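-- pv_equiv track=rewrite | github.com/jerrt2003/leetcode-in-python | live-interview-feedback/Google/巧克力甜度/DP+BIS.py | splitChocolate
-- ===== SOURCE A (Python) =====
-- def splitChocolate(nums, k):
--     """
--     Problem Size: [ 1, len(nums) )
--     Split: [1, k+1)
--     start idx: [ 0, len(nums) )
--     :param nums:
--     :return:
--     """
--     m = len(nums)
--     tree = FenwickTree(m)
--     for i, v in enumerate(nums, 1):
--         tree.update(i, v)
--
--     DP = [[0]*(k+1) for _ in range(m+1)]
--     DP[0][0] = float('inf')
--
--     for i in range(1, m+1):
--         for j in range(1, k+1):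
--             for c in range(i):
--                 tmp = tree.query(i) - tree.query(c)
--                 DP[i][j] = max(DP[i][j], min(DP[c][j-1], tmp))
--
--     return DP[-1][-1]
--
-- class FenwickTree(object):
--     def __init__(self, N):
--         self.tree = [0]*(N+1)
--
--     def update(self, idx, delta):
--         while idx < len(self.tree):
--             self.tree[idx] += delta
--             idx += idx & (-idx)
--
--     def query(self, idx):
--         ret = 0
--         while idx > 0:
--             ret += self.tree[idx]
--             idx -= idx & (-idx)
--         return ret
-- ===== SOURCE B (Python) =====
-- def splitChocolate(nums, k):
--     """Top-down memoized recursion on the number of pieces, demand-driven from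
--     the state (len(nums), k), with the closed-form cut f(i, j) = 0 whenever
--     j > i (more pieces than squares); None stands for +infinity."""
--     P = [0]
--     for v in nums:
--         P.append(P[-1] + v)
--     memo = {}
--
--     def f(i, j):
--         if i < j:
--             return 0
--         if j == 0:
--             return None if i == 0 else 0
--         if (i, j) in memo:
--             return memo[(i, j)]
--         best = 0
--         for c in range(i):
--             sub = f(c, j - 1)
--             piece = P[i] - P[c]
--             best = max(best, piece if sub is None else min(sub, piece))
--         memo[(i, j)] = best
--         return best
--
--     r = f(len(nums), k)
--     return float('inf') if r is None else r
-- ===== Notes on version B (the rewrite author's own statement) =====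
-- stated objective: faster
-- what changed: B replaces A's bottom-up three-nested-loop table fed by a Fenwick tree with a top-down memoized recursion over prefix sums, demand-driven from the single state (len(nums), k), using the proved closed-form cut f(i,j)=0 for j>i to skip states entirely.
-- outside the precondition, e.g. on splitChocolate([], 0): A returns inf, B returns inf; on splitChocolate([5], -1): A raises IndexError, B returns 0
import Mathlib
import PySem

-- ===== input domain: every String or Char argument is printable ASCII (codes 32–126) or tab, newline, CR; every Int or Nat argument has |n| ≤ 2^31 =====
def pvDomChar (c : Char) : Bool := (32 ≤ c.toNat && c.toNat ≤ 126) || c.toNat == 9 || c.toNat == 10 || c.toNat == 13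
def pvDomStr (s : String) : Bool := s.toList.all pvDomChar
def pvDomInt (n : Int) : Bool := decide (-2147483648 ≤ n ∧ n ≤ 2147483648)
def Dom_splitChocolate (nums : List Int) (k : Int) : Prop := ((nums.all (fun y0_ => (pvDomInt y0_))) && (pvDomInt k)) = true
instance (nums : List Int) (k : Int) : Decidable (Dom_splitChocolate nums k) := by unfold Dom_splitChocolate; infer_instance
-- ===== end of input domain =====

-- B replaces A's bottom-up three-nested-loop DP table fed by a Fenwick tree with a top-down
-- memoized recursion over prefix sums, demand-driven from the single state (len(nums), k),
-- with the closed-form cut f(i, j) = 0 for j > i (alternative decomposition).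

-- ===== PORT A =====
-- FenwickTree.update: 'while idx < len(self.tree)' as fuel recursion; fuel = tree.length + 1 is
-- enough for every call the program makes (idx ≥ 1 and idx grows by idx & -idx ≥ 1 each step).
def fenUpdate (fuel : Nat) (tree : List Int) (idx delta : Int) : List Int :=
  match fuel with
  | 0 => tree
  | fuel + 1 =>
    if idx < (tree.length : Int) then
      fenUpdate fuel (PySem.List.pySetD tree idx (PySem.List.pyGetD tree idx 0 + delta))
        (idx + PySem.Int.band idx (-idx)) delta
    else tree

-- FenwickTree.query: 'while idx > 0' as fuel recursion; fuel = idx.toNat + 1 is enough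
-- (idx shrinks by idx & -idx ≥ 1 each step).
def fenQuery (fuel : Nat) (tree : List Int) (idx : Int) : Int :=
  match fuel with
  | 0 => 0
  | fuel + 1 =>
    if 0 < idx then
      PySem.List.pyGetD tree idx 0 + fenQuery fuel tree (idx - PySem.Int.band idx (-idx))
    else 0

-- `none` models the float('inf') planted at DP[0][0]; every other entry is an int.
def splitChocolate (nums : List Int) (k : Int) : Int :=
  let m := nums.length
  let tree0 : List Int := List.replicate (m + 1) 0
  let tree := (PySem.List.enumerate nums 1).foldl
      (fun t iv => fenUpdate (t.length + 1) t iv.1 iv.2) tree0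
  let DP0 : List (List (Option Int)) :=
      List.replicate (m + 1) (List.replicate (k + 1).toNat (some 0))
  let DP1 := PySem.List.pySetD DP0 0 (PySem.List.pySetD (PySem.List.pyGetD DP0 0 []) 0 none)
  let DPf := (PySem.List.pyRange 1 ((m : Int) + 1) 1).foldl (fun DP i =>
      (PySem.List.pyRange 1 (k + 1) 1).foldl (fun DP j =>
        (PySem.List.pyRange 0 i 1).foldl (fun DP c =>
          let tmp := fenQuery (i.toNat + 1) tree i - fenQuery (c.toNat + 1) tree c
          let sub := PySem.List.pyGetD (PySem.List.pyGetD DP c []) (j - 1) (some 0)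
          let cur := PySem.List.pyGetD (PySem.List.pyGetD DP i []) j (some 0)
          let v : Option Int :=
            match cur, sub with
            | none, _ => none                     -- max(inf, _) = inf
            | some p, none => some (max p tmp)    -- min(inf, tmp) = tmp
            | some p, some s => some (max p (min s tmp))
          PySem.List.pySetD DP i (PySem.List.pySetD (PySem.List.pyGetD DP i []) j v)) DP) DP) DP1
  -- return DP[-1][-1]; the getD defaults are unreachable under Pre_
  (PySem.List.pyGetD (PySem.List.pyGetD DPf (-1) []) (-1) (some 0)).getD 0

-- ===== PORT B =====
-- `none` models Python's None (the +infinity placeholder at state (0,0)); memo keys are the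
-- Python tuples (i, j). fB is Source B's `f`, loopB its `for c in range(i)` loop (mutual recursion,
-- piece count j decreasing).
mutual
def fB (P : List Int) (j i : Nat) (memo : PySem.Dict (Int × Int) Int) :
    Option Int × PySem.Dict (Int × Int) Int :=
  if i < j then (some 0, memo)
  else match j with
  | 0 => (if i = 0 then none else some 0, memo)
  | j' + 1 =>
    match PySem.Dict.get? memo ((i : Int), ((j' + 1 : Nat) : Int)) with
    | some v => (some v, memo)
    | none =>
      let r := loopB P j' i (List.range i) 0 memo
      (some r.1, PySem.Dict.insert r.2 ((i : Int), ((j' + 1 : Nat) : Int)) r.1)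
termination_by (j, 1, 0)

def loopB (P : List Int) (j' i : Nat) (cs : List Nat) (acc : Int)
    (memo : PySem.Dict (Int × Int) Int) : Int × PySem.Dict (Int × Int) Int :=
  match cs with
  | [] => (acc, memo)
  | c :: cs' =>
    let s := fB P j' c memo
    loopB P j' i cs' (max acc (match s.1 with
      | none => PySem.List.pyGetD P (i : Int) 0 - PySem.List.pyGetD P (c : Int) 0
      | some v => min v (PySem.List.pyGetD P (i : Int) 0 - PySem.List.pyGetD P (c : Int) 0))) s.2
termination_by (j' + 1, 0, cs.length)
end

-- k.toNat: under Pre_ we have 0 ≤ k (Python recurses forever / hits the recursion limit for k < 0)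
def splitChocolate_alt (nums : List Int) (k : Int) : Int :=
  let P : List Int := nums.foldl (fun acc v => acc ++ [PySem.List.pyGetD acc (-1) 0 + v]) [0]
  let r := fB P k.toNat nums.length PySem.Dict.empty
  -- Python returns float('inf') when r is None, reachable only at nums = [] ∧ k = 0 (outside Pre_)
  r.1.getD 0

-- ===== PRECONDITION & SPEC =====
-- Pre_ excludes k < 0, where A raises IndexError, and the single corner nums = [] ∧ k = 0,
-- where A returns float('inf'), not an int.
def Pre_splitChocolate (nums : List Int) (k : Int) : Prop := 1 ≤ k ∨ (k = 0 ∧ nums ≠ [])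
instance (nums : List Int) (k : Int) : Decidable (Pre_splitChocolate nums k) := by
  unfold Pre_splitChocolate; infer_instance

def pvWitness_splitChocolate : List Int × Int := ([3, 1, 2], 2)

def Spec_splitChocolate (nums : List Int) (k : Int) (out : Int) : Prop := out = splitChocolate_alt nums k
instance (nums : List Int) (k : Int) (out : Int) : Decidable (Spec_splitChocolate nums k out) := by
  unfold Spec_splitChocolate; infer_instance

-- ===== CLAIM (what is proved, stated in full; the proofs are below) =====
def Claim_equal_splitChocolate : Prop := ∀ (nums : List Int) (k : Int), Dom_splitChocolate nums k → Pre_splitChocolate nums k → Spec_splitChocolate nums k (splitChocolate nums k)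

-- ===== LEMMAS AND PROOFS =====

-- ---- lowbit theory: Lb n is the Python value n & -n for n ≥ 1 ----
def Lb (n : Nat) : Nat := n - (n &&& (n - 1))

theorem land_odd_pred (m : Nat) : (2 * m + 1) &&& (2 * m) = 2 * m := by
  apply Nat.eq_of_testBit_eq; intro i
  cases i with
  | zero => simp [Nat.testBit_zero]
  | succ i =>
      rw [Nat.testBit_and, Nat.testBit_succ, Nat.testBit_succ]
      have h1 : (2 * m + 1) / 2 = m := by omega
      have h2 : (2 * m) / 2 = m := by omega
      rw [h1, h2, Bool.and_self]

theorem land_even_pred (m : Nat) (hm : 1 ≤ m) : (2 * m) &&& (2 * m - 1) = 2 * (m &&& (m - 1)) := by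
  apply Nat.eq_of_testBit_eq; intro i
  cases i with
  | zero => simp [Nat.testBit_zero]
  | succ i =>
      rw [Nat.testBit_and, Nat.testBit_succ, Nat.testBit_succ, Nat.testBit_succ]
      have h1 : (2 * m) / 2 = m := by omega
      have h2 : (2 * m - 1) / 2 = m - 1 := by omega
      have h3 : (2 * (m &&& (m - 1))) / 2 = m &&& (m - 1) := by omega
      rw [h1, h2, h3, Nat.testBit_and]

theorem Lb_odd (n : Nat) (h : n % 2 = 1) : Lb n = 1 := by
  obtain ⟨m, rfl⟩ : ∃ m, n = 2 * m + 1 := ⟨n / 2, by omega⟩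
  unfold Lb
  have h2 : 2 * m + 1 - 1 = 2 * m := by omega
  rw [h2, land_odd_pred]; omega

theorem Lb_two_mul (m : Nat) (h : 1 ≤ m) : Lb (2 * m) = 2 * Lb m := by
  unfold Lb
  rw [land_even_pred m h]
  have := Nat.and_le_left (n := m) (m := m - 1)
  omega

theorem Lb_of_decomp (s o : Nat) : Lb (2 ^ s * (2 * o + 1)) = 2 ^ s := by
  induction s with
  | zero => simpa using Lb_odd (2 * o + 1) (by omega)
  | succ s ih =>
      have h : 2 ^ (s + 1) * (2 * o + 1) = 2 * (2 ^ s * (2 * o + 1)) := by ring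
      have hp : 1 ≤ 2 ^ s * (2 * o + 1) := by
        have := Nat.two_pow_pos s; nlinarith
      rw [h, Lb_two_mul _ hp, ih]; ring

theorem Lb_spec (n : Nat) (h : 1 ≤ n) : ∃ s o, n = 2 ^ s * (2 * o + 1) ∧ Lb n = 2 ^ s := by
  obtain ⟨s, o, hso⟩ : ∃ s o, n = 2 ^ s * (2 * o + 1) := by
    induction n using Nat.strong_induction_on with
    | _ n ih =>
        rcases Nat.even_or_odd n with he | ho
        · obtain ⟨r, hr⟩ := he
          obtain ⟨s, o, hso⟩ := ih r (by omega) (by omega)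
          exact ⟨s + 1, o, by rw [hr, hso]; ring⟩
        · obtain ⟨o, rfl⟩ := ho
          exact ⟨0, o, by ring⟩
  exact ⟨s, o, hso, by rw [hso, Lb_of_decomp]⟩

theorem Lb_pos (n : Nat) (h : 1 ≤ n) : 1 ≤ Lb n := by
  obtain ⟨s, o, _, hl⟩ := Lb_spec n h
  rw [hl]; exact Nat.two_pow_pos s

theorem Lb_le (n : Nat) (h : 1 ≤ n) : Lb n ≤ n := by
  obtain ⟨s, o, he, hl⟩ := Lb_spec n h
  rw [hl, he]; nlinarith [Nat.two_pow_pos s]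

theorem band_neg_self (n : Nat) (h : 1 ≤ n) : PySem.Int.band (n : Int) (-(n : Int)) = (Lb n : Int) := by
  unfold PySem.Int.band Lb
  have h1 : (0 : Int) ≤ (n : Int) := by positivity
  have h2 : ¬ (0 : Int) ≤ -(n : Int) := by omega
  simp only [h1, h2, if_false, if_pos]
  have h3 : (-(-(n:Int)) - 1).toNat = n - 1 := by omega
  have h4 : ((n : Int)).toNat = n := by omega
  rw [h3, h4]


theorem step_hit (i idx : Nat) (h1 : idx - Lb idx < i) (h2 : i < idx) : i + Lb i ≤ idx := by
  obtain ⟨t, o, hie, hil⟩ := Lb_spec idx (by omega)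
  have hsplit : idx = 2 ^ (t + 1) * o + 2 ^ t := by rw [hie, pow_succ]; ring
  have hA : idx - Lb idx = 2 ^ (t + 1) * o := by rw [hil]; omega
  set A := idx - Lb idx with hAdef
  have hidxA : idx = A + 2 ^ t := by rw [hAdef, hil]; omega
  set d := i - A with hd
  have hd1 : 1 ≤ d := by omega
  have hdlt : d < 2 ^ t := by omega
  obtain ⟨s, o', hde, hdl⟩ := Lb_spec d hd1
  have hst : s < t := by
    by_contra hc
    have : 2 ^ t ≤ 2 ^ s := Nat.pow_le_pow_right (by omega) (by omega)
    nlinarith [Nat.two_pow_pos s, hde]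
  have hpows : 2 ^ (t + 1) = 2 ^ s * 2 ^ (t - s) * 2 := by
    rw [show t + 1 = (s + (t - s)) + 1 by omega, pow_succ, pow_add]
  have hLbi : Lb i = 2 ^ s := by
    have hi : i = 2 ^ s * (2 * (2 ^ (t - s) * o + o') + 1) := by
      have h6 : i = A + d := by omega
      rw [h6, hA, hde, hpows]; ring
    rw [hi, Lb_of_decomp]
  have hstep : d + 2 ^ s ≤ 2 ^ t := by
    have h7 : 2 ^ t = 2 ^ s * 2 ^ (t - s) := by rw [← pow_add]; congr 1; omega
    have h8 : 2 * o' + 1 < 2 ^ (t - s) := by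
      rw [hde, h7] at hdlt
      exact lt_of_mul_lt_mul_left hdlt (by omega)
    calc d + 2 ^ s = 2 ^ s * (2 * o' + 2) := by rw [hde]; ring
    _ ≤ 2 ^ s * 2 ^ (t - s) := Nat.mul_le_mul_left _ (by omega)
    _ = 2 ^ t := h7.symm
  omega

theorem step_skip (i idx : Nat) (h0 : 1 ≤ i) (hidx : 1 ≤ idx) (h : i ≤ idx - Lb idx) :
    i + Lb i ≤ idx - Lb idx ∨ idx < i + Lb i := by
  obtain ⟨t, o, hie, hil⟩ := Lb_spec idx hidx
  have hsplit : idx = 2 ^ (t + 1) * o + 2 ^ t := by rw [hie, pow_succ]; ring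
  have hA : idx - Lb idx = 2 ^ (t + 1) * o := by rw [hil]; omega
  set A := idx - Lb idx with hAdef
  have hidxA : idx = A + 2 ^ t := by rw [hAdef, hil]; omega
  obtain ⟨s, o', hde, hdl⟩ := Lb_spec i h0
  have hsum : i + Lb i = 2 ^ (s + 1) * (o' + 1) := by rw [hdl, hde, pow_succ]; ring
  rcases Nat.lt_or_ge s t with hst | hts
  · -- s < t: both A and i + Lb i are multiples of 2^(s+1), and i + Lb i < A + 2^(s+1)
    left
    obtain ⟨y, hy⟩ : ∃ y, A = 2 ^ (s + 1) * y :=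
      ⟨2 ^ (t - s) * o, by rw [hA, show t + 1 = (s + 1) + (t - s) by omega, pow_add]; ring⟩
    have hlt : i + Lb i < A + 2 ^ (s + 1) := by
      have : Lb i < 2 ^ (s + 1) := by rw [hdl, pow_succ]; have := Nat.two_pow_pos s; omega
      omega
    rw [hsum, hy] at hlt ⊢
    have hle : o' + 1 ≤ y := by
      have h9 : 2 ^ (s + 1) * (o' + 1) < 2 ^ (s + 1) * (y + 1) := by
        calc 2 ^ (s + 1) * (o' + 1) < 2 ^ (s + 1) * y + 2 ^ (s + 1) := hlt
        _ = 2 ^ (s + 1) * (y + 1) := by ring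
      have := lt_of_mul_lt_mul_left h9 (show 0 ≤ 2 ^ (s + 1) by positivity)
      omega
    exact Nat.mul_le_mul_left _ hle
  · -- s ≥ t: i + Lb i is a multiple of 2^(t+1); (A, A + 2^t] contains none
    rcases Nat.lt_or_ge A (i + Lb i) with hgt | hle
    case _ =>
      right
      by_contra hc
      have hc' : i + Lb i ≤ idx := by omega
      obtain ⟨x, hx⟩ : ∃ x, i + Lb i = 2 ^ (t + 1) * x :=
        ⟨2 ^ (s - t) * (o' + 1), by
          rw [hsum, show s + 1 = (t + 1) + (s - t) by omega, pow_add]; ring⟩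
      have ho : o < x := by
        rw [hA] at hgt; rw [hx] at hgt
        exact lt_of_mul_lt_mul_left hgt (by omega)
      have hmle : 2 ^ (t + 1) * (o + 1) ≤ 2 ^ (t + 1) * x := Nat.mul_le_mul_left _ (by omega)
      have hexp : 2 ^ (t + 1) * (o + 1) = A + 2 ^ (t + 1) := by rw [hA]; ring
      have h2t : 2 ^ (t + 1) = 2 * 2 ^ t := by rw [pow_succ]; ring
      rw [hx] at hc'
      omega
    case _ => exact Or.inl hle

-- ---- Fenwick tree: the built tree answers prefix sums ----
def qspec (tree : List Int) (n : Nat) : Int :=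
  if h : n = 0 then 0
  else PySem.List.pyGetD tree (n : Int) 0 + qspec tree (n - Lb n)
termination_by n
decreasing_by
  have := Lb_pos n (by omega)
  omega

theorem fenQuery_eq_qspec (tree : List Int) (n fuel : Nat) (h : n < fuel) :
    fenQuery fuel tree (n : Int) = qspec tree n := by
  induction fuel generalizing n with
  | zero => omega
  | succ fuel ih =>
      rw [fenQuery]
      by_cases h0 : n = 0
      · subst h0
        rw [qspec]
        norm_num
      · have hn1 : 1 ≤ n := by omega
        rw [if_pos (by exact_mod_cast Nat.pos_of_ne_zero h0)]
        rw [band_neg_self n hn1]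
        have hle := Lb_le n hn1
        have hpos := Lb_pos n hn1
        have hcast : (n : Int) - (Lb n : Int) = ((n - Lb n : Nat) : Int) := by omega
        rw [hcast, ih (n - Lb n) (by omega)]
        conv_rhs => rw [qspec]
        rw [dif_neg h0]

theorem length_fenUpdate (fuel : Nat) (tree : List Int) (idx delta : Int) :
    (fenUpdate fuel tree idx delta).length = tree.length := by
  induction fuel generalizing tree idx with
  | zero => rfl
  | succ fuel ih =>
      rw [fenUpdate]
      split
      · rw [ih, PySem.List.length_pySetD]
      · rfl

theorem fenUpdate_entry (fuel : Nat) (tree : List Int) (i : Nat) (δ : Int) (hi : 1 ≤ i)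
    (hf : tree.length ≤ fuel + i) (idx : Nat) (hidx : idx < tree.length) :
    PySem.List.pyGetD (fenUpdate fuel tree (i : Int) δ) (idx : Int) 0 =
      PySem.List.pyGetD tree (idx : Int) 0 + (if idx - Lb idx < i ∧ i ≤ idx then δ else 0) := by
  induction fuel generalizing tree i with
  | zero =>
      rw [fenUpdate, if_neg (by omega)]
      ring
  | succ fuel ih =>
      rw [fenUpdate]
      by_cases hlt : (i : Int) < (tree.length : Int)
      · rw [if_pos hlt]
        have hilen : i < tree.length := by exact_mod_cast hlt
        rw [band_neg_self i hi]
        have hcast : (i : Int) + (Lb i : Int) = ((i + Lb i : Nat) : Int) := by push_cast; ring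
        rw [hcast]
        have hLbpos := Lb_pos i hi
        set tree' := PySem.List.pySetD tree (i : Int) (PySem.List.pyGetD tree (i : Int) 0 + δ)
          with ht'
        have hlen' : tree'.length = tree.length := by
          rw [ht', PySem.List.length_pySetD]
        rw [ih tree' (i + Lb i) (by omega) (by omega) (by rw [hlen']; exact hidx)]
        rw [ht', PySem.List.pyGetD_pySetD_natCast tree i idx _ 0 hilen]
        by_cases heq : idx = i
        · subst heq
          rw [if_pos rfl]
          have hLbidx := Lb_pos idx (by omega)
          rw [if_neg (by omega), if_pos (by omega)]
          ring
        · rw [if_neg heq]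
          have hiff : (idx - Lb idx < i + Lb i ∧ i + Lb i ≤ idx) ↔ (idx - Lb idx < i ∧ i ≤ idx) := by
            constructor
            · rintro ⟨hB1, hB2⟩
              have hile : i ≤ idx := by omega
              refine ⟨?_, hile⟩
              by_contra hcon
              rcases step_skip i idx hi (by omega) (by omega) with hs | hs <;> omega
            · rintro ⟨hA1, hA2⟩
              have hilt : i < idx := by omega
              have := step_hit i idx hA1 hilt
              exact ⟨by omega, this⟩
          rcases Classical.em (idx - Lb idx < i ∧ i ≤ idx) with hA | hA
          · rw [if_pos (hiff.mpr hA), if_pos hA]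
          · rw [if_neg (fun hB => hA (hiff.mp hB)), if_neg hA]
      · rw [if_neg hlt, if_neg (by
          have : (tree.length : Int) ≤ (i : Int) := by omega
          have : tree.length ≤ i := by exact_mod_cast this
          omega)]
        ring

theorem qspec_fenUpdate (tree : List Int) (i : Nat) (δ : Int) (hi : 1 ≤ i) (n : Nat)
    (hn : n < tree.length) :
    qspec (fenUpdate (tree.length + 1) tree (i : Int) δ) n =
      qspec tree n + (if i ≤ n then δ else 0) := by
  induction n using Nat.strong_induction_on with
  | _ n ihn =>
      by_cases h0 : n = 0
      · subst h0
        have hz : ∀ t : List Int, qspec t 0 = 0 := by intro t; rw [qspec]; norm_num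
        rw [hz, hz, if_neg (by omega)]
        ring
      · have hn1 : 1 ≤ n := by omega
        have hLbpos := Lb_pos n hn1
        have hLble := Lb_le n hn1
        conv_lhs => rw [qspec]
        conv_rhs => rw [qspec]
        rw [dif_neg h0, dif_neg h0]
        rw [fenUpdate_entry (tree.length + 1) tree i δ hi (by omega) n hn]
        rw [ihn (n - Lb n) (by omega) (by omega)]
        split_ifs <;> omega

def pre (nums : List Int) (n : Nat) : Int := (nums.take n).sum

theorem qspec_enum_fold (l : List Int) (s : Nat) (tree : List Int) (hs : 1 ≤ s) (n : Nat)
    (hn : n < tree.length) :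
    qspec ((PySem.List.enumerate l (s : Int)).foldl
        (fun t iv => fenUpdate (t.length + 1) t iv.1 iv.2) tree) n =
      qspec tree n + (l.take (n + 1 - s)).sum := by
  induction l generalizing s tree with
  | nil => simp [PySem.List.enumerate_nil]
  | cons v l ih =>
      rw [PySem.List.enumerate_cons]
      simp only [List.foldl_cons]
      have hlen : (fenUpdate (tree.length + 1) tree (s : Int) v).length = tree.length :=
        length_fenUpdate _ _ _ _
      have hcast : (s : Int) + 1 = ((s + 1 : Nat) : Int) := by push_cast; ring
      rw [hcast, ih (s + 1) _ (by omega) (by rw [hlen]; exact hn)]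
      rw [qspec_fenUpdate tree s v hs n hn]
      by_cases hsn : s ≤ n
      · rw [if_pos hsn]
        have h1 : n + 1 - s = (n - s) + 1 := by omega
        have h2 : n + 1 - (s + 1) = n - s := by omega
        rw [h1, h2, List.take_succ_cons, List.sum_cons]
        ring
      · rw [if_neg hsn]
        have h1 : n + 1 - s = 0 := by omega
        have h2 : n + 1 - (s + 1) = 0 := by omega
        rw [h1, h2]
        simp

theorem qspec_zero_tree (m n : Nat) (hn : n ≤ m) : qspec (List.replicate (m + 1) (0 : Int)) n = 0 := by
  induction n using Nat.strong_induction_on with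
  | _ n ihn =>
      by_cases h0 : n = 0
      · subst h0; rw [qspec]; norm_num
      · have hn1 : 1 ≤ n := by omega
        have hLbpos := Lb_pos n hn1
        rw [qspec, dif_neg h0]
        rw [ihn (n - Lb n) (by omega) (by omega)]
        rw [PySem.List.pyGetD_natCast]
        have hg : (List.replicate (m + 1) (0 : Int)).getD n 0 = 0 := by
          rw [List.getD_eq_getElem?_getD, List.getElem?_replicate]
          simp [show n < m + 1 by omega]
        rw [hg]
        ring

theorem qspec_build (nums : List Int) (n : Nat) (hn : n ≤ nums.length) :
    qspec ((PySem.List.enumerate nums 1).foldl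
      (fun t iv => fenUpdate (t.length + 1) t iv.1 iv.2)
      (List.replicate (nums.length + 1) 0)) n = pre nums n := by
  have h1 : ((1 : Nat) : Int) = (1 : Int) := rfl
  rw [← h1, qspec_enum_fold nums 1 _ (by omega) n (by simp; omega)]
  rw [qspec_zero_tree nums.length n hn]
  unfold pre
  norm_num

-- ---- the common DP value ----
def oMin : Option Int → Int → Int
  | none, t => t
  | some s, t => min s t

def g (nums : List Int) : Nat → Nat → Option Int
  | 0, 0 => none
  | 0, _ + 1 => some 0
  | _ + 1, 0 => some 0
  | i + 1, j + 1 => some ((List.range (i + 1)).foldl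
      (fun acc c => max acc (oMin (g nums c j) (pre nums (i + 1) - pre nums c))) 0)
termination_by i j => j

-- ---- generic list helpers ----
theorem set_getD_self {α : Type} (l : List α) (n : Nat) (d : α) (h : n < l.length) :
    l.set n (l.getD n d) = l := by
  apply List.ext_getElem (by simp)
  intro i h1 h2
  rw [List.getElem_set]
  split
  · next heq => subst heq; rw [List.getD_eq_getElem]
  · rfl

theorem set_map_range {α : Type} (f : Nat → α) (n r : Nat) (v : α) (hr : r < n) :
    ((List.range n).map f).set r v = (List.range n).map (fun x => if x = r then v else f x) := by
  apply List.ext_getElem (by simp)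
  intro i h1 h2
  simp only [List.getElem_set, List.getElem_map, List.getElem_range]
  split_ifs <;> first | rfl | omega

-- ---- B-side: the prefix-sum list ----
def psum (p : Int) : List Int → List Int
  | [] => []
  | v :: l => (p + v) :: psum (p + v) l

theorem foldl_pref (l : List Int) : ∀ (acc : List Int) (p : Int), acc.getLast? = some p →
    l.foldl (fun acc v => acc ++ [PySem.List.pyGetD acc (-1) 0 + v]) acc = acc ++ psum p l := by
  induction l with
  | nil => intro acc p _; simp [psum]
  | cons v l ih =>
      intro acc p hp
      have hne : acc ≠ [] := by intro h; subst h; simp at hp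
      simp only [List.foldl_cons]
      rw [PySem.List.pyGetD_neg_one acc 0 hne]
      have hlast : acc.getLast hne = p := by
        have h2 := List.getLast?_eq_getLast (l := acc) hne
        rw [h2] at hp
        exact (Option.some_inj.mp hp)
      rw [hlast, ih (acc ++ [p + v]) (p + v) (by simp)]
      rw [psum]
      simp

theorem psum_map (l : List Int) : ∀ p : Int,
    psum p l = (List.range l.length).map (fun n => p + pre l (n + 1)) := by
  induction l with
  | nil => intro p; simp [psum]
  | cons v l ih =>
      intro p
      rw [psum, ih (p + v), List.length_cons, List.range_succ_eq_map]
      simp only [List.map_cons, List.map_map]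
      congr 1
      · simp [pre]
      · apply List.map_congr_left
        intro n hn
        simp [Function.comp, pre, List.take_succ_cons]
        ring

theorem prefList_eq (nums : List Int) :
    nums.foldl (fun acc v => acc ++ [PySem.List.pyGetD acc (-1) 0 + v]) [0] =
      (List.range (nums.length + 1)).map (fun n => pre nums n) := by
  rw [foldl_pref nums [0] 0 rfl, psum_map, List.range_succ_eq_map]
  simp only [List.map_cons, List.map_map, List.singleton_append]
  congr 1
  apply List.map_congr_left
  intro n hn
  simp [Function.comp]

-- ---- B-side: structural facts about g ----
theorem g_succ_row (nums : List Int) (i j : Nat) (hi : 1 ≤ i) :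
    g nums i (j + 1) = some ((List.range i).foldl
      (fun acc c => max acc (oMin (g nums c j) (pre nums i - pre nums c))) 0) := by
  obtain ⟨i', rfl⟩ : ∃ i', i = i' + 1 := ⟨i - 1, by omega⟩
  rw [g]

theorem g_row_zero (nums : List Int) (j : Nat) : g nums 0 (j + 1) = some 0 := by rw [g]

theorem g_col_zero (nums : List Int) (i : Nat) (hi : 1 ≤ i) : g nums i 0 = some 0 := by
  obtain ⟨i', rfl⟩ : ∃ i', i = i' + 1 := ⟨i - 1, by omega⟩
  rw [g]

-- g vanishes strictly above the diagonal: more pieces than squares gives value 0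
theorem foldl_max_oMin_zero (t : Nat → Int) (v : Nat → Option Int) :
    ∀ l : List Nat, (∀ c ∈ l, v c = some 0) →
      l.foldl (fun acc c => max acc (oMin (v c) (t c))) 0 = 0 := by
  intro l
  induction l with
  | nil => intro _; rfl
  | cons c l ih =>
      intro h
      simp only [List.foldl_cons]
      rw [h c List.mem_cons_self]
      have hm : max 0 (oMin (some 0) (t c)) = 0 := by
        simp only [oMin]
        omega
      rw [hm]
      exact ih (fun c hc => h c (List.mem_cons_of_mem _ hc))

theorem g_lt (nums : List Int) : ∀ j i : Nat, i < j → g nums i j = some 0 := by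
  intro j
  induction j with
  | zero => intro i h; omega
  | succ j' ih =>
      intro i h
      cases i with
      | zero => exact g_row_zero nums j'
      | succ i' =>
          rw [g_succ_row nums (i' + 1) j' (by omega)]
          rw [foldl_max_oMin_zero _ _ (List.range (i' + 1))
            (fun c hc => ih c (by have := List.mem_range.mp hc; omega))]

-- ---- B-side: the memo invariant and correctness of fB ----
def GoodMemo (nums : List Int) (memo : PySem.Dict (Int × Int) Int) : Prop :=
  ∀ (i j : Nat) (v : Int), PySem.Dict.get? memo ((i : Int), (j : Int)) = some v →
    g nums i j = some v

theorem fB_correct (nums P : List Int)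
    (hP : ∀ n : Nat, n ≤ nums.length → PySem.List.pyGetD P (n : Int) 0 = pre nums n) :
    ∀ (j i : Nat) (memo : PySem.Dict (Int × Int) Int), i ≤ nums.length → GoodMemo nums memo →
      (fB P j i memo).1 = g nums i j ∧ GoodMemo nums (fB P j i memo).2 := by
  intro j
  induction j with
  | zero =>
      intro i memo him hg
      rw [fB]
      rw [if_neg (by omega)]
      by_cases h0 : i = 0
      · subst h0; simp [g, hg]
      · rw [if_neg h0]
        exact ⟨(g_col_zero nums i (by omega)).symm, hg⟩
  | succ j' ih =>
      intro i memo him hg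
      rw [fB]
      by_cases hij : i < j' + 1
      · rw [if_pos hij]
        exact ⟨(g_lt nums (j' + 1) i hij).symm, hg⟩
      · rw [if_neg hij]
        simp only
        cases hget : PySem.Dict.get? memo ((i : Int), ((j' + 1 : Nat) : Int)) with
        | some v =>
            exact ⟨(hg i (j' + 1) v hget).symm, hg⟩
        | none =>
            -- the c-loop computes the fold defining g
            have loop : ∀ (cs : List Nat), (∀ c ∈ cs, c ≤ nums.length) →
                ∀ (acc : Int) (mem0 : PySem.Dict (Int × Int) Int), GoodMemo nums mem0 →
                (loopB P j' i cs acc mem0).1 =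
                  cs.foldl (fun a c => max a (oMin (g nums c j') (pre nums i - pre nums c))) acc ∧
                GoodMemo nums (loopB P j' i cs acc mem0).2 := by
              intro cs
              induction cs with
              | nil =>
                  intro _ acc mem0 hm
                  rw [loopB]
                  exact ⟨rfl, hm⟩
              | cons c cs' ihc =>
                  intro hcs acc mem0 hm
                  obtain ⟨h1, h2⟩ := ih c mem0 (hcs c List.mem_cons_self) hm
                  rw [loopB]
                  simp only [List.foldl_cons]
                  have hacc : (max acc (match (fB P j' c mem0).1 with
                      | none => PySem.List.pyGetD P (i : Int) 0 - PySem.List.pyGetD P (c : Int) 0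
                      | some v => min v (PySem.List.pyGetD P (i : Int) 0 -
                          PySem.List.pyGetD P (c : Int) 0)))
                      = max acc (oMin (g nums c j') (pre nums i - pre nums c)) := by
                    rw [hP i him, hP c (hcs c List.mem_cons_self), h1]
                    cases g nums c j' <;> rfl
                  rw [hacc]
                  exact ihc (fun c hc => hcs c (List.mem_cons_of_mem _ hc)) _ _ h2
            obtain ⟨hl1, hl2⟩ := loop (List.range i)
              (fun c hc => by have := List.mem_range.mp hc; omega) 0 memo hg
            refine ⟨?_, ?_⟩
            · show some (loopB P j' i (List.range i) 0 memo).1 = g nums i (j' + 1)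
              rw [hl1, g_succ_row nums i j' (by omega)]
            · show GoodMemo nums (PySem.Dict.insert (loopB P j' i (List.range i) 0 memo).2
                ((i : Int), ((j' + 1 : Nat) : Int)) (loopB P j' i (List.range i) 0 memo).1)
              intro i0 j0 v hv
              rw [PySem.Dict.get?_insert] at hv
              by_cases hk : ((i0 : Int), (j0 : Int)) = ((i : Int), ((j' + 1 : Nat) : Int))
              · rw [if_pos hk] at hv
                have hi0 : i0 = i := by
                  have := congrArg Prod.fst hk; simpa using this
                have hj0 : j0 = j' + 1 := by
                  have := congrArg Prod.snd hk
                  simp only at this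
                  exact_mod_cast this
                rw [hi0, hj0, g_succ_row nums i j' (by omega), ← hl1,
                  Option.some_inj.mp hv]
              · rw [if_neg hk] at hv
                exact hl2 i0 j0 v hv

theorem splitChocolate_alt_eq_g (nums : List Int) (K : Nat) :
    splitChocolate_alt nums (K : Int) = (g nums nums.length K).getD 0 := by
  simp only [splitChocolate_alt]
  rw [prefList_eq nums, Int.toNat_natCast]
  have hP : ∀ n : Nat, n ≤ nums.length →
      PySem.List.pyGetD ((List.range (nums.length + 1)).map (fun n => pre nums n)) (n : Int) 0 =
        pre nums n := by
    intro n hn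
    rw [PySem.List.pyGetD_natCast, PySem.List.getD_map_range _ _ _ _ (by omega)]
  have hempty : GoodMemo nums PySem.Dict.empty := by
    intro i j v hv
    rw [PySem.Dict.get?_empty] at hv
    exact absurd hv (by simp)
  obtain ⟨h1, _⟩ := fB_correct nums _ hP K nums.length PySem.Dict.empty (le_refl _) hempty
  rw [h1]

-- ---- A-side: rows of the DP table ----
def rowG (nums : List Int) (K r : Nat) : List (Option Int) :=
  (List.range (K + 1)).map (fun j => g nums r j)

def dpForm (nums : List Int) (K t : Nat) : List (List (Option Int)) :=
  (List.range (nums.length + 1)).map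
    (fun r => if r ≤ t then rowG nums K r else List.replicate (K + 1) (some 0))

theorem cfold_eq (nums : List Int) (tree : List Int)
    (htree : ∀ n : Nat, n ≤ nums.length → fenQuery (n + 1) tree (n : Int) = pre nums n)
    (K jn : Nat) (hj1 : 1 ≤ jn) (hjK : jn ≤ K) (i : Nat) (hi : 1 ≤ i) (him : i ≤ nums.length) :
    ∀ (cs : List Nat) (DP : List (List (Option Int))) (a : Int),
    (∀ c ∈ cs, c < i) →
    (∀ c : Nat, c < i → PySem.List.pyGetD DP (c : Int) [] = rowG nums K c) →
    DP.length = nums.length + 1 →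
    (PySem.List.pyGetD DP (i : Int) []).length = K + 1 →
    PySem.List.pyGetD (PySem.List.pyGetD DP (i : Int) []) (jn : Int) (some 0) = some a →
    (cs.map (fun c : Nat => (c : Int))).foldl (fun DP c =>
      let tmp := fenQuery ((i : Int).toNat + 1) tree (i : Int) - fenQuery (c.toNat + 1) tree c
      let sub := PySem.List.pyGetD (PySem.List.pyGetD DP c []) ((jn : Int) - 1) (some 0)
      let cur := PySem.List.pyGetD (PySem.List.pyGetD DP (i : Int) []) (jn : Int) (some 0)
      let v : Option Int :=
        match cur, sub with
        | none, _ => none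
        | some p, none => some (max p tmp)
        | some p, some s => some (max p (min s tmp))
      PySem.List.pySetD DP (i : Int) (PySem.List.pySetD (PySem.List.pyGetD DP (i : Int) []) (jn : Int) v)) DP
    = PySem.List.pySetD DP (i : Int) (PySem.List.pySetD (PySem.List.pyGetD DP (i : Int) []) (jn : Int)
        (some (cs.foldl (fun acc c => max acc (oMin (g nums c (jn - 1)) (pre nums i - pre nums c))) a))) := by
  intro cs
  induction cs with
  | nil =>
      intro DP a _ _ hlen hrowlen hcell
      simp only [PySem.List.pyGetD_natCast] at hrowlen hcell
      simp only [List.map_nil, List.foldl_nil, PySem.List.pySetD_natCast,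
        PySem.List.pyGetD_natCast]
      rw [← hcell, set_getD_self _ _ _ (by omega), set_getD_self _ _ _ (by omega)]
  | cons c cs ih =>
      intro DP a hcs hrows hlen hrowlen hcell
      simp only [List.map_cons, List.foldl_cons]
      have hci : c < i := hcs c (List.mem_cons_self)
      have hsub : PySem.List.pyGetD (PySem.List.pyGetD DP (c : Int) []) ((jn : Int) - 1) (some 0)
          = g nums c (jn - 1) := by
        rw [hrows c hci]
        have hc1 : (jn : Int) - 1 = ((jn - 1 : Nat) : Int) := by omega
        rw [hc1, PySem.List.pyGetD_natCast]
        unfold rowG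
        rw [PySem.List.getD_map_range _ _ _ _ (by omega)]
      set a' := max a (oMin (g nums c (jn - 1)) (pre nums i - pre nums c)) with ha'
      have hstep : (PySem.List.pySetD DP ((i : Int))
          (PySem.List.pySetD (PySem.List.pyGetD DP (i : Int) []) ((jn : Int))
            (match PySem.List.pyGetD (PySem.List.pyGetD DP (i : Int) []) ((jn : Int)) (some 0),
              PySem.List.pyGetD (PySem.List.pyGetD DP (c : Int) []) ((jn : Int) - 1) (some 0) with
            | none, _ => none
            | some p, none => some (max p (fenQuery (((i : Int)).toNat + 1) tree (i : Int) -
                fenQuery (((c : Int)).toNat + 1) tree (c : Int)))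
            | some p, some s => some (max p (min s (fenQuery (((i : Int)).toNat + 1) tree (i : Int) -
                fenQuery (((c : Int)).toNat + 1) tree (c : Int)))))))
          = PySem.List.pySetD DP (i : Int)
              (PySem.List.pySetD (PySem.List.pyGetD DP (i : Int) []) ((jn : Int)) (some a')) := by
        rw [hcell, hsub, Int.toNat_natCast, Int.toNat_natCast, htree i him, htree c (by omega)]
        cases hg : g nums c (jn - 1) with
        | none => simp [oMin, ha', hg]
        | some s => simp [oMin, ha', hg]
      rw [hstep]
      set row := PySem.List.pyGetD DP (i : Int) [] with hrow
      set DP' := PySem.List.pySetD DP (i : Int) (PySem.List.pySetD row (jn : Int) (some a')) with hDP'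
      have hgetrow' : PySem.List.pyGetD DP' (i : Int) [] = PySem.List.pySetD row (jn : Int) (some a') := by
        rw [hDP', PySem.List.pyGetD_pySetD_natCast _ _ _ _ _ (by omega), if_pos rfl]
      have happ := ih DP' a' (fun x hx => hcs x (List.mem_cons_of_mem _ hx))
        (by
          intro c' hc'
          rw [hDP', PySem.List.pyGetD_pySetD_natCast _ _ _ _ _ (by omega), if_neg (by omega)]
          exact hrows c' hc')
        (by rw [hDP', PySem.List.length_pySetD]; exact hlen)
        (by rw [hgetrow', PySem.List.length_pySetD]; exact hrowlen)
        (by rw [hgetrow', PySem.List.pyGetD_pySetD_natCast _ _ _ _ _ (by omega), if_pos rfl])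
      rw [happ, hgetrow', hDP']
      simp only [PySem.List.pySetD_natCast, List.set_set]

theorem jfold_eq (nums : List Int) (tree : List Int)
    (htree : ∀ n : Nat, n ≤ nums.length → fenQuery (n + 1) tree (n : Int) = pre nums n)
    (K : Nat) (i : Nat) (hi : 1 ≤ i) (him : i ≤ nums.length) :
    (PySem.List.pyRange 1 ((K : Int) + 1) 1).foldl (fun DP j =>
      (PySem.List.pyRange 0 (i : Int) 1).foldl (fun DP c =>
        let tmp := fenQuery ((i : Int).toNat + 1) tree (i : Int) - fenQuery (c.toNat + 1) tree c
        let sub := PySem.List.pyGetD (PySem.List.pyGetD DP c []) (j - 1) (some 0)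
        let cur := PySem.List.pyGetD (PySem.List.pyGetD DP (i : Int) []) j (some 0)
        let v : Option Int :=
          match cur, sub with
          | none, _ => none
          | some p, none => some (max p tmp)
          | some p, some s => some (max p (min s tmp))
        PySem.List.pySetD DP (i : Int) (PySem.List.pySetD (PySem.List.pyGetD DP (i : Int) []) j v)) DP)
      (dpForm nums K (i - 1)) = dpForm nums K i := by
  set m := nums.length with hm
  -- F u : the table with row i filled up to column u
  have main : ∀ u : Nat, u ≤ K →
      (PySem.List.pyRange 1 ((u : Int) + 1) 1).foldl (fun DP j =>
        (PySem.List.pyRange 0 (i : Int) 1).foldl (fun DP c =>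
          let tmp := fenQuery ((i : Int).toNat + 1) tree (i : Int) - fenQuery (c.toNat + 1) tree c
          let sub := PySem.List.pyGetD (PySem.List.pyGetD DP c []) (j - 1) (some 0)
          let cur := PySem.List.pyGetD (PySem.List.pyGetD DP (i : Int) []) j (some 0)
          let v : Option Int :=
            match cur, sub with
            | none, _ => none
            | some p, none => some (max p tmp)
            | some p, some s => some (max p (min s tmp))
          PySem.List.pySetD DP (i : Int) (PySem.List.pySetD (PySem.List.pyGetD DP (i : Int) []) j v)) DP)
        (dpForm nums K (i - 1)) =
      (List.range (m + 1)).map (fun r =>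
        if r < i then rowG nums K r
        else if r = i then (List.range (K + 1)).map (fun j => if 1 ≤ j ∧ j ≤ u then g nums i j else some 0)
        else List.replicate (K + 1) (some 0)) := by
    intro u
    induction u with
    | zero =>
        intro _
        rw [PySem.List.pyRange_one_eq_nil (a := 1) (b := ((0 : Nat) : Int) + 1) (by simp)]
        simp only [List.foldl_nil]
        unfold dpForm
        apply List.map_congr_left
        intro r hr
        by_cases h1 : r < i
        · rw [if_pos (by omega), if_pos h1]
        · rw [if_neg (by omega), if_neg h1]
          by_cases h2 : r = i
          · rw [if_pos h2]
            have : (List.range (K + 1)).map (fun j => if 1 ≤ j ∧ j ≤ 0 then g nums i j else some 0)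
                = (List.range (K + 1)).map (fun _ => (some 0 : Option Int)) := by
              apply List.map_congr_left; intro j _; rw [if_neg (by omega)]
            rw [this, List.map_const', List.length_range]
          · rw [if_neg h2]
    | succ u ihu =>
        intro hu
        have hcast : ((u : Int) + 1) + 1 = ((u + 1 : Nat) : Int) + 1 := by push_cast; ring
        rw [← hcast, PySem.List.pyRange_one_succ_right (a := 1) (b := (u : Int) + 1) (by omega),
          List.foldl_append, ihu (by omega), List.foldl_cons, List.foldl_nil]
        simp only
        have hcast2 : ((u : Int) + 1) = ((u + 1 : Nat) : Int) := by push_cast; ring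
        rw [hcast2]
        rw [PySem.List.pyRange_zero_natCast i]
        set Fu := (List.range (m + 1)).map (fun r =>
          if r < i then rowG nums K r
          else if r = i then (List.range (K + 1)).map (fun j => if 1 ≤ j ∧ j ≤ u then g nums i j else some 0)
          else List.replicate (K + 1) (some 0)) with hFu
        have hrowi : PySem.List.pyGetD Fu (i : Int) []
            = (List.range (K + 1)).map (fun j => if 1 ≤ j ∧ j ≤ u then g nums i j else some 0) := by
          rw [hFu, PySem.List.pyGetD_natCast, PySem.List.getD_map_range _ _ _ _ (by omega),
            if_neg (by omega), if_pos rfl]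
        have happly := cfold_eq nums tree htree K (u + 1) (by omega) (by omega) i hi him
          (List.range i) Fu 0
          (fun c hc => List.mem_range.mp hc)
          (by
            intro c hc
            rw [hFu, PySem.List.pyGetD_natCast, PySem.List.getD_map_range _ _ _ _ (by omega),
              if_pos hc])
          (by rw [hFu]; simp [hm])
          (by rw [hrowi]; simp)
          (by rw [hrowi, PySem.List.pyGetD_natCast, PySem.List.getD_map_range _ _ _ _ (by omega),
                if_neg (by omega)])
        rw [happly, hrowi]
        have hgval : some ((List.range i).foldl
            (fun acc c => max acc (oMin (g nums c (u + 1 - 1)) (pre nums i - pre nums c))) 0)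
            = g nums i (u + 1) := by
          rw [g_succ_row nums i u hi]
          norm_num
        rw [hgval]
        simp only [PySem.List.pySetD_natCast]
        rw [hFu, set_map_range _ _ _ _ (by omega)]
        apply List.map_congr_left
        intro r hr
        by_cases hri : r = i
        · subst hri
          rw [if_pos rfl, if_neg (by omega), if_pos rfl]
          apply List.ext_getElem (by simp)
          intro jj h1 h2
          simp only [List.getElem_set, List.getElem_map, List.getElem_range]
          have hjj : jj < K + 1 := by simpa using h1
          by_cases hj2 : jj = u + 1
          · rw [if_pos (by omega), if_pos (by omega)]
            subst hj2; rfl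
          · rw [if_neg (by omega)]
            by_cases hj3 : 1 ≤ jj ∧ jj ≤ u
            · rw [if_pos hj3, if_pos (by omega)]
            · rw [if_neg hj3, if_neg (by omega)]
        · rw [if_neg hri]
          split_ifs <;> rfl
  rw [main K (by omega)]
  unfold dpForm
  apply List.map_congr_left
  intro r hr
  by_cases h1 : r < i
  · rw [if_pos h1, if_pos (by omega)]
  · rw [if_neg h1]
    by_cases h2 : r = i
    · subst h2
      rw [if_pos rfl, if_pos (by omega)]
      unfold rowG
      apply List.map_congr_left
      intro j hjmem
      have hjK : j < K + 1 := List.mem_range.mp hjmem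
      by_cases hj : 1 ≤ j
      · rw [if_pos (by omega)]
      · have hj0 : j = 0 := by omega
        subst hj0
        rw [if_neg (by omega), g_col_zero nums r hi]
    · rw [if_neg h2, if_neg (by omega)]

theorem dpForm_zero (nums : List Int) (K : Nat) :
    dpForm nums K 0 = (none :: List.replicate K (some 0)) ::
      List.replicate nums.length (List.replicate (K + 1) (some 0)) := by
  unfold dpForm
  rw [List.range_succ_eq_map]
  simp only [List.map_cons, List.map_map]
  congr 1
  · rw [if_pos (by omega)]
    unfold rowG
    rw [List.range_succ_eq_map]
    simp only [List.map_cons, List.map_map]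
    congr 1
    · rw [g]
    · have h : (List.map ((fun j => g nums 0 j) ∘ Nat.succ) (List.range K))
          = (List.range K).map (fun _ => (some 0 : Option Int)) := by
        apply List.map_congr_left
        intro j _
        simp only [Function.comp]
        rw [g_row_zero]
      rw [h, List.map_const', List.length_range]
  · have h : (List.map ((fun r => if r ≤ 0 then rowG nums K r else List.replicate (K + 1) (some 0)) ∘ Nat.succ)
        (List.range nums.length))
        = (List.range nums.length).map (fun _ => List.replicate (K + 1) (some 0)) := by
      apply List.map_congr_left
      intro r _
      simp only [Function.comp]
      rw [if_neg (by omega)]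
    rw [h, List.map_const', List.length_range]

theorem splitChocolate_eq_g (nums : List Int) (K : Nat) :
    splitChocolate nums (K : Int) = (g nums nums.length K).getD 0 := by
  simp only [splitChocolate]
  set m := nums.length with hm
  set tree := (PySem.List.enumerate nums 1).foldl
      (fun t iv => fenUpdate (t.length + 1) t iv.1 iv.2) (List.replicate (m + 1) 0) with htr
  have htree : ∀ n : Nat, n ≤ m → fenQuery (n + 1) tree (n : Int) = pre nums n := by
    intro n hn
    rw [fenQuery_eq_qspec tree n (n + 1) (by omega), htr, hm]
    exact qspec_build nums n hn
  -- the initial table is dpForm 0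
  have hKt : ((K : Int) + 1).toNat = K + 1 := by omega
  rw [hKt]
  have hDP1 : PySem.List.pySetD (List.replicate (m + 1) (List.replicate (K + 1) (some 0)))
      (0 : Int) (PySem.List.pySetD
        (PySem.List.pyGetD (List.replicate (m + 1) (List.replicate (K + 1) (some (0 : Int)))) (0 : Int) [])
        (0 : Int) none) = dpForm nums K 0 := by
    rw [dpForm_zero]
    rw [PySem.List.pyGetD_zero]
    rw [List.replicate_succ, List.getD_cons_zero]
    rw [PySem.List.pySetD_of_nonneg _ _ (by omega), PySem.List.pySetD_of_nonneg _ _ (by omega)]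
    rw [List.replicate_succ]
    rfl
  rw [hDP1]
  -- the i-loop fills the table row by row
  have main : ∀ t : Nat, t ≤ m →
      (PySem.List.pyRange 1 ((t : Int) + 1) 1).foldl (fun DP i =>
        (PySem.List.pyRange 1 ((K : Int) + 1) 1).foldl (fun DP j =>
          (PySem.List.pyRange 0 i 1).foldl (fun DP c =>
            let tmp := fenQuery (i.toNat + 1) tree i - fenQuery (c.toNat + 1) tree c
            let sub := PySem.List.pyGetD (PySem.List.pyGetD DP c []) (j - 1) (some 0)
            let cur := PySem.List.pyGetD (PySem.List.pyGetD DP i []) j (some 0)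
            let v : Option Int :=
              match cur, sub with
              | none, _ => none
              | some p, none => some (max p tmp)
              | some p, some s => some (max p (min s tmp))
            PySem.List.pySetD DP i (PySem.List.pySetD (PySem.List.pyGetD DP i []) j v)) DP) DP)
        (dpForm nums K 0) = dpForm nums K t := by
    intro t
    induction t with
    | zero =>
        intro _
        rw [PySem.List.pyRange_one_eq_nil (a := 1) (b := ((0 : Nat) : Int) + 1) (by simp)]
        simp only [List.foldl_nil]
    | succ t iht =>
        intro ht
        have hcast : ((t : Int) + 1) + 1 = ((t + 1 : Nat) : Int) + 1 := by push_cast; ring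
        rw [← hcast, PySem.List.pyRange_one_succ_right (a := 1) (b := (t : Int) + 1) (by omega),
          List.foldl_append, iht (by omega), List.foldl_cons, List.foldl_nil]
        have hcast2 : ((t : Int) + 1) = ((t + 1 : Nat) : Int) := by push_cast; ring
        rw [hcast2]
        have := jfold_eq nums tree htree K (t + 1) (by omega) (by omega)
        rw [show t + 1 - 1 = t from rfl] at this
        exact this
  rw [main m (by omega)]
  -- DP[-1][-1]
  have hne : dpForm nums K m ≠ [] := by
    unfold dpForm
    simp
  rw [PySem.List.pyGetD_neg_one _ _ hne]
  have hlast : (dpForm nums K m).getLast hne = rowG nums K m := by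
    rw [List.getLast_eq_getElem]
    unfold dpForm
    simp only [List.length_map, List.length_range]
    rw [List.getElem_map]
    rw [List.getElem_range]
    rw [show m + 1 - 1 = m from rfl, if_pos (le_refl m)]
  rw [hlast]
  have hne2 : rowG nums K m ≠ [] := by
    unfold rowG
    simp
  rw [PySem.List.pyGetD_neg_one _ _ hne2]
  rw [List.getLast_eq_getElem]
  unfold rowG
  simp only [List.length_map, List.length_range]
  rw [List.getElem_map, List.getElem_range]
  rfl

-- ===== VERDICT (by name: the statement is the Claim_ definition above) =====
theorem splitChocolate_spec : Claim_equal_splitChocolate := by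
  intro nums k _hdom hpre
  unfold Spec_splitChocolate
  have hk : 0 ≤ k := by rcases hpre with h | ⟨h, _⟩ <;> omega
  obtain ⟨K, rfl⟩ : ∃ K : Nat, k = (K : Int) := ⟨k.toNat, by omega⟩
  rw [splitChocolate_eq_g nums K, splitChocolate_alt_eq_g nums K]
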